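-- pv_equiv track=rewrite | github.com/dissonancehelix/Helix | labs/research/music/structure/symbolic_analyzer.py | _key_pitch_classes
-- ===== SOURCE A (Python) =====
-- _NOTE_NAMES = ['C', 'C#', 'D', 'D#', 'E', 'F', 'F#', 'G', 'G#', 'A', 'A#', 'B']
--
-- def _key_pitch_classes(key_name: str) -> set[int]:
--     """Return set of pitch classes for a given key name (e.g. 'C major')."""
--     major_scale = [0, 2, 4, 5, 7, 9, 11]
--     minor_scale = [0, 2, 3, 5, 7, 8, 10]
--     parts = key_name.split()
--     if len(parts) < 2:
--         return set(major_scale)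
--     root_name = parts[0]
--     scale = major_scale if parts[1] == 'major' else minor_scale
--     root = _NOTE_NAMES.index(root_name) if root_name in _NOTE_NAMES else 0
--     return {(root + s) % 12 for s in scale}
-- ===== SOURCE B (Python) =====
-- _NOTE_NAMES = ['C', 'C#', 'D', 'D#', 'E', 'F', 'F#', 'G', 'G#', 'A', 'A#', 'B']
--
-- # Interval step patterns (semitones between successive scale degrees).
-- _MAJOR_STEPS = [2, 2, 1, 2, 2, 2, 1]
-- _MINOR_STEPS = [2, 1, 2, 2, 1, 2, 2]
--
-- def _key_pitch_classes(key_name: str) -> set[int]: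
--     """Return set of pitch classes for a given key name (e.g. 'C major')."""
--     parts = key_name.split()
--     if len(parts) < 2:
--         return {0, 2, 4, 5, 7, 9, 11}
--     root = _NOTE_NAMES.index(parts[0]) if parts[0] in _NOTE_NAMES else 0
--     steps = _MAJOR_STEPS if parts[1] == 'major' else _MINOR_STEPS
--     pcs = set()
--     pc = root % 12
--     for step in steps:
--         pcs.add(pc)
--         pc = (pc + step) % 12
--     return pcs
-- ===== Notes on version B (the rewrite author's own statement) =====
-- stated objective: alternative
-- what changed: Scales are represented as interval step patterns in semitones and the pitch classes are generated by walking a running pitch class through the pattern, instead of mapping absolute degree offsets through (root+s)%12.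
import Mathlib
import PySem

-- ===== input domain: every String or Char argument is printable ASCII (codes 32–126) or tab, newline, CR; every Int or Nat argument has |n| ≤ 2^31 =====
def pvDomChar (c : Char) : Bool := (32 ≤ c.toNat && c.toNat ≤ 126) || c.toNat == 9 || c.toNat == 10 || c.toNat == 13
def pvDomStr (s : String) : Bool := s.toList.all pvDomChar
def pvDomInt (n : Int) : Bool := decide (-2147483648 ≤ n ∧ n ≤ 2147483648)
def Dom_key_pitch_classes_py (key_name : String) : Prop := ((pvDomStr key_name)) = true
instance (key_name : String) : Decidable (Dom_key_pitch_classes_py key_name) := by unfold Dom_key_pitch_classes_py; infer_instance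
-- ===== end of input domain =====

-- B replaces A's absolute degree-offset scales by interval step patterns walked with a
-- running pitch class (objective: alternative representation; same cost).
-- Both Pythons return a set[int]; the ports build it as PySem.Set Int (distinct elements).

-- ===== PORT A =====
def pvNoteNames : List String := ["C", "C#", "D", "D#", "E", "F", "F#", "G", "G#", "A", "A#", "B"]

def key_pitch_classes_py (key_name : String) : List Int :=
  let major_scale : List Int := [0, 2, 4, 5, 7, 9, 11]
  let minor_scale : List Int := [0, 2, 3, 5, 7, 8, 10]
  let parts := PySem.Str.split₀ key_name
  if parts.length < 2 then
    PySem.Set.ofList major_scale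
  else
    let root_name := PySem.List.pyGetD parts 0 ""   -- parts[0]; in range: parts.length ≥ 2
    let scale := if PySem.List.pyGetD parts 1 "" == "major" then major_scale else minor_scale
    -- '_NOTE_NAMES.index(root_name) if root_name in _NOTE_NAMES else 0'
    let root : Int :=
      match PySem.List.index? pvNoteNames root_name with
      | some i => (i : Int)
      | none => 0
    PySem.Set.ofList (scale.map (fun s => PySem.Int.mod (root + s) 12))

-- ===== PORT B =====
def pvMajorSteps : List Int := [2, 2, 1, 2, 2, 2, 1]
def pvMinorSteps : List Int := [2, 1, 2, 2, 1, 2, 2]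

def key_pitch_classes_py_alt (key_name : String) : List Int :=
  let parts := PySem.Str.split₀ key_name
  if parts.length < 2 then
    [0, 2, 4, 5, 7, 9, 11]
  else
    let root : Int :=
      match PySem.List.index? pvNoteNames (PySem.List.pyGetD parts 0 "") with
      | some i => (i : Int)
      | none => 0
    let steps := if PySem.List.pyGetD parts 1 "" == "major" then pvMajorSteps else pvMinorSteps
    (steps.foldl
      (fun (st : PySem.Set Int × Int) step =>
        (PySem.Set.add st.1 st.2, PySem.Int.mod (st.2 + step) 12))
      (PySem.Set.empty, PySem.Int.mod root 12)).1

-- ===== PRECONDITION & SPEC =====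
def Spec_key_pitch_classes_py (key_name : String) (out : List Int) : Prop := out = key_pitch_classes_py_alt key_name
instance (key_name : String) (out : List Int) : Decidable (Spec_key_pitch_classes_py key_name out) := by unfold Spec_key_pitch_classes_py; infer_instance

-- ===== CLAIM (what is proved, stated in full; the proofs are below) =====
def Claim_equal_key_pitch_classes_py : Prop := ∀ (key_name : String), Dom_key_pitch_classes_py key_name → Spec_key_pitch_classes_py key_name (key_pitch_classes_py key_name)

-- ===== LEMMAS AND PROOFS =====

-- For every root 0 ≤ n < 12 and either quality, mapping the offset scale equals walking the step pattern.
lemma pv_scale_eq_steps : ∀ n : Nat, n < 12 → ∀ b : Bool,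
    PySem.Set.ofList
      (((if b then ([0, 2, 4, 5, 7, 9, 11] : List Int) else [0, 2, 3, 5, 7, 8, 10])).map
        (fun s => PySem.Int.mod ((n : Int) + s) 12)) =
    ((if b then pvMajorSteps else pvMinorSteps).foldl
      (fun (st : PySem.Set Int × Int) step =>
        (PySem.Set.add st.1 st.2, PySem.Int.mod (st.2 + step) 12))
      (PySem.Set.empty, PySem.Int.mod (n : Int) 12)).1 := by
  decide

lemma pv_root_lt {s : String} {i : Nat} (h : PySem.List.index? pvNoteNames s = some i) : i < 12 := by
  obtain ⟨hk, -, -⟩ := PySem.List.getElem_of_index?_eq_some h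
  simpa [pvNoteNames] using hk

-- ===== VERDICT (by name: the statement is the Claim_ definition above) =====
theorem key_pitch_classes_py_spec : Claim_equal_key_pitch_classes_py := by
  intro key_name _
  unfold Spec_key_pitch_classes_py key_pitch_classes_py key_pitch_classes_py_alt
  simp only []
  by_cases hlen : (PySem.Str.split₀ key_name).length < 2
  · simp [hlen]
    decide
  · simp only [hlen, if_false]
    rcases hidx : PySem.List.index? pvNoteNames (PySem.List.pyGetD (PySem.Str.split₀ key_name) 0 "") with _ | i
    · by_cases hmaj : (PySem.List.pyGetD (PySem.Str.split₀ key_name) 1 "" == "major") = true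
      · simpa [hidx, hmaj] using pv_scale_eq_steps 0 (by omega) true
      · simp only [Bool.not_eq_true] at hmaj
        simpa [hidx, hmaj] using pv_scale_eq_steps 0 (by omega) false
    · have hi : i < 12 := pv_root_lt hidx
      by_cases hmaj : (PySem.List.pyGetD (PySem.Str.split₀ key_name) 1 "" == "major") = true
      · simpa [hidx, hmaj] using pv_scale_eq_steps i hi true
      · simp only [Bool.not_eq_true] at hmaj
        simpa [hidx, hmaj] using pv_scale_eq_steps i hi false
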